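-- pv_equiv track=rewrite | github.com/rickohnemorty/sudokuTool | python code/expDict.py | create_position_zeros
-- ===== SOURCE A (Python) =====
-- def create_dict(puzzle):
--     arr = []
--     for i in puzzle:
--         for e in i:
--             arr.append(e)
--     squares = [
--         0, 0, 0, 1, 1, 1, 2, 2, 2,
--         0, 0, 0, 1, 1, 1, 2, 2, 2,
--         0, 0, 0, 1, 1, 1, 2, 2, 2,
--         3, 3, 3, 4, 4, 4, 5, 5, 5,
--         3, 3, 3, 4, 4, 4, 5, 5, 5,
--         3, 3, 3, 4, 4, 4, 5, 5, 5,
--         6, 6, 6, 7, 7, 7, 8, 8, 8,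
--         6, 6, 6, 7, 7, 7, 8, 8, 8,
--         6, 6, 6, 7, 7, 7, 8, 8, 8
--     ]
--     positions = []
--     counter_i = 0
--     counter_e = 0
--     counter_square = 0
--     for i in arr:
--         if counter_i >= 9:
--             counter_e += 1
--             counter_i = 0
--         else:
--             pass
--         positions.append((counter_i, counter_e, squares[counter_square]))
--         counter_i += 1
--         counter_square += 1
--     dictionary = dict(zip(positions, arr))
--     return dictionary
--
-- def create_position_zeros(puzzle):
--     dictionary = create_dict(puzzle)
--     counter = 0
--     positions_zeros = []
--     for i in list(dictionary.values()):
--         if i == 0: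
--             positions_zeros.append(list(dictionary)[counter])
--         else:
--             pass
--         counter += 1
--     return positions_zeros
-- ===== SOURCE B (Python) =====
-- def create_position_zeros(puzzle):
--     flat = [v for row in puzzle for v in row]
--     return [(i % 9, i // 9, (i // 27) * 3 + (i % 9) // 3)
--             for i, v in enumerate(flat) if v == 0]
-- ===== Notes on version B (the rewrite author's own statement) =====
-- stated objective: simpler
-- what changed: Drops the dictionary and the 81-entry square lookup table entirely: one comprehension over the flattened puzzle computes each position arithmetically ((i%9, i//9, (i//27)*3+(i%9)//3)) and keeps it when the cell is 0.
import Mathlib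
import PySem

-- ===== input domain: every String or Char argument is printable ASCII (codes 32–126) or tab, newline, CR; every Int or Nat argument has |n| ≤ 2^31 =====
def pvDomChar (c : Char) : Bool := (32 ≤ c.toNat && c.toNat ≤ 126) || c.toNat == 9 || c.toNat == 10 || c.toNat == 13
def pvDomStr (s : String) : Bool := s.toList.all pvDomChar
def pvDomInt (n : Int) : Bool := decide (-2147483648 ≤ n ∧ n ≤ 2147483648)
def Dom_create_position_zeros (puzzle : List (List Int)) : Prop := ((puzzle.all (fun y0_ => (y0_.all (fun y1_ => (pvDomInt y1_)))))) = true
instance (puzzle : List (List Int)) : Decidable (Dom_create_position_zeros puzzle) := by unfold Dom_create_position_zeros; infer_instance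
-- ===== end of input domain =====

-- B replaces A's dict + 81-entry square table by one pass over the flattened puzzle with
-- arithmetic positions; objective: simpler. Equivalence is over the return value only.

-- ===== PORT A =====
-- the literal 81-entry 'squares' table of create_dict
def pySquares : List Int :=
  [0, 0, 0, 1, 1, 1, 2, 2, 2,
   0, 0, 0, 1, 1, 1, 2, 2, 2,
   0, 0, 0, 1, 1, 1, 2, 2, 2,
   3, 3, 3, 4, 4, 4, 5, 5, 5,
   3, 3, 3, 4, 4, 4, 5, 5, 5,
   3, 3, 3, 4, 4, 4, 5, 5, 5,
   6, 6, 6, 7, 7, 7, 8, 8, 8,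
   6, 6, 6, 7, 7, 7, 8, 8, 8,
   6, 6, 6, 7, 7, 7, 8, 8, 8]

-- 'for i in puzzle: for e in i: arr.append(e)'
def pvFlattenA (puzzle : List (List Int)) : List Int :=
  puzzle.foldl (fun arr i => i.foldl (fun arr e => arr ++ [e]) arr) []

-- the positions loop of create_dict; squares[counter_square] may raise IndexError → Option
def pvPosLoop : List Int → Int → Int → Int → List (Int × Int × Int) →
    Option (List (Int × Int × Int))
  | [], _, _, _, positions => some positions
  | _ :: rest, ci, ce, cs, positions =>
    let (ci, ce) := if ci ≥ 9 then ((0 : Int), ce + 1) else (ci, ce)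
    match PySem.List.pyGet? pySquares cs with
    | none => none
    | some sq => pvPosLoop rest (ci + 1) ce (cs + 1) (positions ++ [(ci, ce, sq)])

def create_dict (puzzle : List (List Int)) : Option (PySem.Dict (Int × Int × Int) Int) :=
  let arr := pvFlattenA puzzle
  match pvPosLoop arr 0 0 0 [] with
  | none => none
  | some positions =>
      -- dict(zip(positions, arr))
      some ((positions.zip arr).foldl (fun d p => d.insert p.1 p.2) PySem.Dict.empty)

-- the zeros loop of create_position_zeros; 'list(dictionary)[counter]' is always in range
-- (counter < len(values) = len(keys)), so the unreachable none-branch appends nothing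
def pvZeroLoop (keys : List (Int × Int × Int)) :
    List Int → Int → List (Int × Int × Int) → List (Int × Int × Int)
  | [], _, acc => acc
  | v :: rest, counter, acc =>
    pvZeroLoop keys rest (counter + 1)
      (if v = 0 then acc ++ (PySem.List.pyGet? keys counter).toList else acc)

def create_position_zeros (puzzle : List (List Int)) : List (Int × Int × Int) :=
  match create_dict puzzle with
  | none => []   -- unreachable under Pre_create_position_zeros (Python raises IndexError here)
  | some d => pvZeroLoop d.keys d.values 0 []

-- ===== PORT B =====
def create_position_zeros_alt (puzzle : List (List Int)) : List (Int × Int × Int) :=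
  let flat := puzzle.flatMap (fun row => row)
  (PySem.List.enumerate flat 0).filterMap (fun p =>
    if p.2 = 0 then
      some (PySem.Int.mod p.1 9, PySem.Int.floordiv p.1 9,
            (PySem.Int.floordiv p.1 27) * 3 + PySem.Int.floordiv (PySem.Int.mod p.1 9) 3)
    else none)

-- ===== PRECONDITION & SPEC =====
-- A raises IndexError (squares table has 81 entries) as soon as the puzzle holds more than
-- 81 cells; Pre_ admits exactly the inputs on which A returns.
def Pre_create_position_zeros (puzzle : List (List Int)) : Prop :=
  (puzzle.map List.length).sum ≤ 81
instance (puzzle : List (List Int)) : Decidable (Pre_create_position_zeros puzzle) := by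
  unfold Pre_create_position_zeros; infer_instance

def pvWitness_create_position_zeros : List (List Int) := [[5, 0, 3], [0, 7, 0], [0, 0, 9]]

def Spec_create_position_zeros (puzzle : List (List Int)) (out : List (Int × Int × Int)) : Prop := out = create_position_zeros_alt puzzle
instance (puzzle : List (List Int)) (out : List (Int × Int × Int)) : Decidable (Spec_create_position_zeros puzzle out) := by unfold Spec_create_position_zeros; infer_instance

-- ===== CLAIM (what is proved, stated in full; the proofs are below) =====
def Claim_equal_create_position_zeros : Prop := ∀ (puzzle : List (List Int)), Dom_create_position_zeros puzzle → Pre_create_position_zeros puzzle → Spec_create_position_zeros puzzle (create_position_zeros puzzle)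

-- ===== LEMMAS AND PROOFS =====

-- the common value both ports produce for cell index n
def pvKey (n : Nat) : Int × Int × Int :=
  ((n % 9 : Nat), (n / 9 : Nat), ((n / 27) * 3 + (n % 9) / 3 : Nat))

-- the common filtered result
def pvSpecList : List Int → Nat → List (Int × Int × Int)
  | [], _ => []
  | v :: rest, n => (if v = 0 then [pvKey n] else []) ++ pvSpecList rest (n + 1)

lemma pvFlattenA_aux : ∀ (ps : List (List Int)) (init : List Int),
    ps.foldl (fun arr i => i.foldl (fun arr e => arr ++ [e]) arr) init
      = init ++ ps.flatMap (fun row => row) := by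
  intro ps
  induction ps with
  | nil => intro init; simp
  | cons r rs ih =>
    intro init
    have hb : List.foldl (fun (arr : List Int) e => arr ++ [e]) init r = init ++ r := by
      simp only [PySem.List.foldl_append_singleton]
    simp only [List.foldl_cons]
    rw [hb, ih, List.flatMap_cons, List.append_assoc]

lemma pvFlattenA_eq (puzzle : List (List Int)) :
    pvFlattenA puzzle = puzzle.flatMap (fun row => row) := by
  have h := pvFlattenA_aux puzzle []
  rw [List.nil_append] at h
  exact h

set_option maxRecDepth 20000 in
lemma squares_lookup (n : Nat) (h : n < 81) :
    PySem.List.pyGet? pySquares (n : Int) = some (((n / 27) * 3 + (n % 9) / 3 : Nat)) := by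
  have hfin : ∀ m : Fin 81,
      PySem.List.pyGet? pySquares ((m : Nat) : Int)
        = some ((((m : Nat) / 27) * 3 + ((m : Nat) % 9) / 3 : Nat)) := by decide
  exact hfin ⟨n, h⟩

-- counter state of A's positions loop at the start of the iteration for index n
def pvCi (n : Nat) : Int := if n % 9 = 0 ∧ n ≠ 0 then 9 else (n % 9 : Nat)
def pvCe (n : Nat) : Int := if n % 9 = 0 ∧ n ≠ 0 then (n / 9 : Nat) - 1 else (n / 9 : Nat)

lemma pvStep (n : Nat) :
    (if pvCi n ≥ 9 then ((0 : Int), pvCe n + 1) else (pvCi n, pvCe n))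
      = (((n % 9 : Nat) : Int), ((n / 9 : Nat) : Int)) := by
  unfold pvCi pvCe
  split_ifs with h1 h2 h3 <;> simp_all <;> omega

lemma pvCi_succ (n : Nat) : ((n % 9 : Nat) : Int) + 1 = pvCi (n + 1) := by
  unfold pvCi; split_ifs with h <;> push_cast <;> omega

lemma pvCe_succ (n : Nat) : ((n / 9 : Nat) : Int) = pvCe (n + 1) := by
  unfold pvCe; split_ifs with h <;> push_cast <;> omega

lemma pvPosLoop_spec : ∀ (rest : List Int) (n : Nat) (acc : List (Int × Int × Int)),
    n + rest.length ≤ 81 →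
    pvPosLoop rest (pvCi n) (pvCe n) (n : Int) acc =
      some (acc ++ (List.range rest.length).map (fun j => pvKey (n + j))) := by
  intro rest
  induction rest with
  | nil => intro n acc _; simp [pvPosLoop]
  | cons v rest ih =>
    intro n acc h
    have hn : n < 81 := by simp only [List.length_cons] at h; omega
    show (match (if pvCi n ≥ 9 then ((0 : Int), pvCe n + 1) else (pvCi n, pvCe n)) with
      | (ci, ce) =>
        match PySem.List.pyGet? pySquares ((n : Nat) : Int) with
        | none => none
        | some sq => pvPosLoop rest (ci + 1) ce ((n : Int) + 1) (acc ++ [(ci, ce, sq)])) = _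
    rw [pvStep n, squares_lookup n hn]
    show pvPosLoop rest (((n % 9 : Nat) : Int) + 1) ((n / 9 : Nat) : Int) ((n : Int) + 1)
        (acc ++ [pvKey n]) = _
    rw [pvCi_succ, pvCe_succ]
    have hc : ((n : Int) + 1) = ((n + 1 : Nat) : Int) := by push_cast; ring
    rw [hc, ih (n + 1) (acc ++ [pvKey n]) (by simp only [List.length_cons] at h; omega)]
    refine congrArg some ?_
    simp only [List.length_cons]
    rw [List.range_succ_eq_map, List.map_cons, List.map_map, List.append_assoc]
    have hfun : ((fun j => pvKey (n + j)) ∘ Nat.succ) = (fun j => pvKey (n + 1 + j)) := by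
      funext j
      simp only [Function.comp_apply]
      congr 1
      omega
    simp [hfun]

lemma pvZeroLoop_spec (L : Nat) (keys : List (Int × Int × Int))
    (hk : keys = (List.range L).map pvKey) :
    ∀ (vals : List Int) (n : Nat) (acc : List (Int × Int × Int)),
    n + vals.length ≤ L →
    pvZeroLoop keys vals (n : Int) acc = acc ++ pvSpecList vals n := by
  intro vals
  induction vals with
  | nil => intro n acc _; simp [pvZeroLoop, pvSpecList]
  | cons v rest ih =>
    intro n acc h
    have hn : n < L := by simp only [List.length_cons] at h; omega
    have hget : PySem.List.pyGet? keys ((n : Nat) : Int) = some (pvKey n) := by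
      rw [PySem.List.pyGet?_natCast, hk]
      simp [List.getElem?_map, List.getElem?_range hn]
    have hc : ((n : Int) + 1) = ((n + 1 : Nat) : Int) := by push_cast; ring
    unfold pvZeroLoop
    rw [hget, hc, ih (n + 1) _ (by simp only [List.length_cons] at h; omega)]
    by_cases hv : v = 0 <;> simp [hv, pvSpecList]

lemma pvAlt_eq_spec (flat : List Int) : ∀ (n : Nat),
    (PySem.List.enumerate flat (n : Int)).filterMap (fun p =>
      if p.2 = 0 then
        some (PySem.Int.mod p.1 9, PySem.Int.floordiv p.1 9,
              (PySem.Int.floordiv p.1 27) * 3 + PySem.Int.floordiv (PySem.Int.mod p.1 9) 3)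
      else none) = pvSpecList flat n := by
  induction flat with
  | nil => intro n; simp [PySem.List.enumerate_nil, pvSpecList]
  | cons v rest ih =>
    intro n
    have hc : ((n : Int) + 1) = ((n + 1 : Nat) : Int) := by push_cast; ring
    rw [PySem.List.enumerate_cons, List.filterMap_cons, hc, ih (n + 1)]
    by_cases hv : v = 0
    · simp [hv, pvSpecList]
      simp only [pvKey, Prod.mk.injEq]
      refine ⟨by omega, by omega, by omega⟩
    · simp [hv, pvSpecList]

lemma pvKey_injective : Function.Injective pvKey := by
  intro a b h
  unfold pvKey at h
  simp only [Prod.mk.injEq, Nat.cast_inj] at h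
  omega

-- ===== VERDICT (by name: the statement is the Claim_ definition above) =====
theorem create_position_zeros_spec : Claim_equal_create_position_zeros := by
  intro puzzle _ hpre
  unfold Spec_create_position_zeros
  obtain ⟨flat, hflat⟩ : ∃ f, puzzle.flatMap (fun row => row) = f := ⟨_, rfl⟩
  have hL : flat.length ≤ 81 := by
    rw [← hflat, List.length_flatMap]
    unfold Pre_create_position_zeros at hpre
    simpa using hpre
  have h0 : pvPosLoop flat 0 0 0 [] = some ((List.range flat.length).map pvKey) := by
    have h := pvPosLoop_spec flat 0 [] (by omega)
    have hci0 : pvCi 0 = 0 := by decide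
    have hce0 : pvCe 0 = 0 := by decide
    rw [hci0, hce0, Nat.cast_zero, List.nil_append] at h
    rw [h]
    simp
  obtain ⟨ps, hps⟩ : ∃ p, (List.range flat.length).map pvKey = p := ⟨_, rfl⟩
  rw [hps] at h0
  have hlen : ps.length = flat.length := by rw [← hps]; simp
  have hfst : (ps.zip flat).map Prod.fst = ps := List.map_fst_zip (le_of_eq hlen)
  have hsnd : (ps.zip flat).map Prod.snd = flat := List.map_snd_zip (le_of_eq hlen.symm)
  have hndps : ((ps.zip flat).map Prod.fst).Nodup := by
    rw [hfst, ← hps]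
    exact List.Nodup.map pvKey_injective List.nodup_range
  have hitems : ((ps.zip flat).foldl (fun d p => d.insert p.1 p.2)
      (PySem.Dict.empty : PySem.Dict (Int × Int × Int) Int)).items = ps.zip flat := by
    have h := PySem.Dict.items_foldl_insert_fresh (l := ps.zip flat) (k := Prod.fst)
      (v := Prod.snd) (d := PySem.Dict.empty)
      (fun a _ => PySem.Dict.contains_empty a.1) hndps
    simpa using h
  have hkeys : ((ps.zip flat).foldl (fun d p => d.insert p.1 p.2)
      (PySem.Dict.empty : PySem.Dict (Int × Int × Int) Int)).keys = ps := by
    simp only [PySem.Dict.keys, hitems]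
    exact hfst
  have hvals : ((ps.zip flat).foldl (fun d p => d.insert p.1 p.2)
      (PySem.Dict.empty : PySem.Dict (Int × Int × Int) Int)).values = flat := by
    simp only [PySem.Dict.values, hitems]
    exact hsnd
  have hz : pvZeroLoop ps flat 0 [] = pvSpecList flat 0 := by
    have h := pvZeroLoop_spec flat.length ps hps.symm flat 0 [] (by omega)
    rw [Nat.cast_zero, List.nil_append] at h
    exact h
  have hb : create_position_zeros_alt puzzle = pvSpecList flat 0 := by
    have h := pvAlt_eq_spec flat 0
    rw [Nat.cast_zero] at h
    simp only [create_position_zeros_alt, hflat]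
    exact h
  calc create_position_zeros puzzle = pvZeroLoop ps flat 0 [] := by
        simp only [create_position_zeros, create_dict, pvFlattenA_eq, hflat, h0, hkeys, hvals]
      _ = create_position_zeros_alt puzzle := by rw [hz, hb]
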